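-- pv_equiv track=rewrite | github.com/alezylka/programowanie---kody | 2 semestr/lista3zad3b.py | sekwencja_RNA
-- ===== SOURCE A (Python) =====
-- def sekwencja_RNA(DNA):
--     """Funkcja przyporządkowuje sekwencje RNA dla nici matrycowej DNA.
--     Args:
--         DNA (str): nic kodujaca DNA
--     Returns:
--         rev_DNA.replace...(str): znaleziona sekwencja nici RNA
--         None: w przeciwnym wypadku, brak danych do zwrocenia
--     """
--
--     allowed_characters = ['A', 'C', 'G', 'T']   #zdefiniowanie rozpatrywanych przez program znakow
--
--     if not(len(DNA) == 0):
--         if any(x not in allowed_characters for x in DNA):   #jeśli w stringu zawieraja sie znaki niedozwolone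
--             return None
--         else:
--             rev_DNA = DNA[::-1]   #odczytanie tablicy DNA od tylu
--             return(rev_DNA.replace('A','u').replace('T','a').replace('C','g').replace('G','c').upper()) #operacja transkrypcji DNA
--     else: #jesli string jest pusty
--         return None
-- ===== SOURCE B (Python) =====
-- def sekwencja_RNA(DNA):
--     """Single pass over the reversed DNA: validate and transcribe at once."""
--     comp = {'A': 'U', 'T': 'A', 'C': 'G', 'G': 'C'}
--     if not DNA:
--         return None
--     out = []
--     for ch in reversed(DNA):
--         m = comp.get(ch)
--         if m is None:
--             return None
--         out.append(m)
--     return ''.join(out)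
-- ===== Notes on version B (the rewrite author's own statement) =====
-- stated objective: simpler
-- what changed: Replaces the separate any()-validation, slice reversal and four chained .replace passes (plus .upper) by one loop over reversed(DNA) with a complement dict that validates and transcribes each character in a single pass.
import Mathlib
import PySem

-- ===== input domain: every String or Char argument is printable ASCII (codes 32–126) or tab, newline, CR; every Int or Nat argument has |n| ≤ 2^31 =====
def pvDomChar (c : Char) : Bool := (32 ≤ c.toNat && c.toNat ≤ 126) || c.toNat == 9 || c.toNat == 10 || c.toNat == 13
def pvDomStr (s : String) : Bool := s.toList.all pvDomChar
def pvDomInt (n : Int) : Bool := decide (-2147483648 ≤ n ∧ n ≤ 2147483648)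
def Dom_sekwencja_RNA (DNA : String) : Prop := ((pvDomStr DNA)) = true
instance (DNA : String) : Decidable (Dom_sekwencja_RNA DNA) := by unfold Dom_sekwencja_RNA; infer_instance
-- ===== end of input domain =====

-- B fuses A's any()-validation, reversal and four .replace passes (+ .upper) into one
-- dict-driven pass over the reversed string; objective: simpler (same O(n) cost).

-- ===== PORT A =====
def sekwencja_RNA (DNA : String) : Option String :=
  let allowed_characters : List Char := ['A', 'C', 'G', 'T']
  if ¬ (PySem.Str.len DNA = 0) then
    if DNA.toList.any (fun x => ¬ (x ∈ allowed_characters)) then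
      none
    else
      -- DNA[::-1]; step -1 ≠ 0 so slice? always returns some
      (PySem.Str.slice? DNA none none (-1)).map (fun rev_DNA =>
        PySem.Str.upper
          (PySem.Str.replace
            (PySem.Str.replace
              (PySem.Str.replace
                (PySem.Str.replace rev_DNA "A" "u") "T" "a") "C" "g") "G" "c"))
  else
    none

-- ===== PORT B =====
-- comp.get(ch) of Source B's dict {'A':'U','T':'A','C':'G','G':'C'}
def pvComp? (ch : Char) : Option Char :=
  if ch = 'A' then some 'U'
  else if ch = 'T' then some 'A'
  else if ch = 'C' then some 'G'
  else if ch = 'G' then some 'C'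
  else none

-- the for-loop of Source B with its early return: accumulate mapped chars, none on a miss
def pvBLoop : List Char → List Char → Option (List Char)
  | [], out => some out
  | ch :: rest, out =>
    match pvComp? ch with
    | none => none
    | some m => pvBLoop rest (out ++ [m])

def sekwencja_RNA_alt (DNA : String) : Option String :=
  if DNA.toList = [] then none
  else (pvBLoop DNA.toList.reverse []).map String.ofList

-- ===== PRECONDITION & SPEC =====
def Spec_sekwencja_RNA (DNA : String) (out : Option String) : Prop := out = sekwencja_RNA_alt DNA
instance (DNA : String) (out : Option String) : Decidable (Spec_sekwencja_RNA DNA out) := by unfold Spec_sekwencja_RNA; infer_instance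

-- ===== CLAIM (what is proved, stated in full; the proofs are below) =====
def Claim_equal_sekwencja_RNA : Prop := ∀ (DNA : String), Dom_sekwencja_RNA DNA → Spec_sekwencja_RNA DNA (sekwencja_RNA DNA)

-- ===== LEMMAS AND PROOFS =====

-- single-character replace is a map
theorem replace_go_single (o n : Char) :
    ∀ (fuel : Nat) (l acc : List Char), l.length ≤ fuel →
      PySem.Chars.replace.go [o] [n] fuel l acc
        = acc.reverse ++ l.map (fun c => if c = o then n else c) := by
  intro fuel
  induction fuel with
  | zero =>
    intro l acc h
    have : l = [] := List.eq_nil_of_length_eq_zero (Nat.le_zero.mp h)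
    subst this
    simp [PySem.Chars.replace.go]
  | succ k ih =>
    intro l acc h
    cases l with
    | nil => simp [PySem.Chars.replace.go]
    | cons c t =>
      simp only [PySem.Chars.replace.go]
      by_cases hc : c = o
      · subst hc
        have hp : List.isPrefixOf [c] (c :: t) = true := by
          simp [List.isPrefixOf]
        rw [if_pos hp]
        simp only [List.length_cons, List.length_nil, Nat.zero_add, List.drop_succ_cons,
          List.drop_zero]
        rw [ih t ([n].reverse ++ acc) (by simpa using Nat.le_of_succ_le_succ h)]
        simp
      · have hp : List.isPrefixOf [o] (c :: t) = false := by
          simp [List.isPrefixOf]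
          exact fun h' => hc h'.symm
        rw [if_neg (by simp [hp])]
        rw [ih t (c :: acc) (by simpa using Nat.le_of_succ_le_succ h)]
        simp [hc]

theorem replace_single (o n : Char) (l : List Char) :
    PySem.Chars.replace l [o] [n] = l.map (fun c => if c = o then n else c) := by
  simp only [PySem.Chars.replace, List.isEmpty]
  rw [if_neg (by simp)]
  simpa using replace_go_single o n l.length l [] (le_refl _)

-- the A-side character pipeline agrees with pvComp? on valid characters
def pvAChar (c : Char) : Char :=
  PySem.Chars.upperChar
    ((fun c => if c = 'G' then 'c' else c)
      ((fun c => if c = 'C' then 'g' else c)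
        ((fun c => if c = 'T' then 'a' else c)
          ((fun c => if c = 'A' then 'u' else c) c))))

theorem pvAChar_eq (c : Char) (h : c ∈ (['A', 'C', 'G', 'T'] : List Char)) :
    pvComp? c = some (pvAChar c) := by
  fin_cases h <;> decide

-- B's loop on an all-valid list
theorem pvBLoop_valid : ∀ (l acc : List Char),
    (∀ c ∈ l, c ∈ (['A', 'C', 'G', 'T'] : List Char)) →
    pvBLoop l acc = some (acc ++ l.map pvAChar) := by
  intro l
  induction l with
  | nil => intro acc _; simp [pvBLoop]
  | cons c t ih =>
    intro acc hv
    have hc := hv c (List.mem_cons_self ..)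
    simp only [pvBLoop, pvAChar_eq c hc]
    rw [ih (acc ++ [pvAChar c]) (fun x hx => hv x (List.mem_cons_of_mem _ hx))]
    simp

-- B's loop on a list containing an invalid character
theorem pvBLoop_invalid : ∀ (l acc : List Char),
    (∃ c ∈ l, c ∉ (['A', 'C', 'G', 'T'] : List Char)) →
    pvBLoop l acc = none := by
  intro l
  induction l with
  | nil => intro acc h; simp at h
  | cons c t ih =>
    intro acc h
    by_cases hc : c ∈ (['A', 'C', 'G', 'T'] : List Char)
    · obtain ⟨d, hd, hdn⟩ := h
      rcases List.mem_cons.mp hd with rfl | hdt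
      · exact absurd hc hdn
      · simp only [pvBLoop, pvAChar_eq c hc]
        exact ih _ ⟨d, hdt, hdn⟩
    · have hnone : pvComp? c = none := by
        simp only [List.mem_cons, List.not_mem_nil, or_false] at hc
        push Not at hc
        obtain ⟨hA, hC, hG, hT⟩ := hc
        simp [pvComp?, hA, hC, hG, hT]
      simp [pvBLoop, hnone]

-- ===== VERDICT (by name: the statement is the Claim_ definition above) =====
set_option maxHeartbeats 1000000 in
theorem sekwencja_RNA_spec : Claim_equal_sekwencja_RNA := by
  intro DNA _
  unfold Spec_sekwencja_RNA sekwencja_RNA sekwencja_RNA_alt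
  by_cases hnil : DNA.toList = []
  · have hlen : PySem.Str.len DNA = 0 := by
      simp [PySem.Str.len, hnil]
    simp [hnil]
  · have hlen : ¬ (PySem.Str.len DNA = 0) := by
      intro h
      apply hnil
      have h0 : DNA.toList.length = 0 := by simpa [PySem.Str.len, PySem.Chars.len] using h
      exact List.eq_nil_of_length_eq_zero h0
    rw [if_pos hlen, if_neg hnil]
    by_cases hv : ∀ c ∈ DNA.toList, c ∈ (['A', 'C', 'G', 'T'] : List Char)
    · have hany : ¬ (DNA.toList.any (fun x => ¬ (x ∈ (['A', 'C', 'G', 'T'] : List Char))) = true) := by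
        rw [Bool.not_eq_true, List.any_eq_false]
        intro x hx
        simp only [decide_eq_true_eq]
        exact not_not_intro (hv x hx)
      rw [if_neg hany]
      rw [PySem.Str.slice?_none_none_neg_one]
      rw [pvBLoop_valid DNA.toList.reverse []
        (fun c hc => hv c (List.mem_reverse.mp hc))]
      simp only [Option.map_some, List.nil_append]
      refine congrArg Option.some ?_
      simp only [PySem.Str.upper, PySem.Str.replace, PySem.Chars.upper]
      rw [String.toList_ofList]
      have hA : ("A" : String).toList = ['A'] := rfl
      have hu : ("u" : String).toList = ['u'] := rfl
      rw [hA, hu, replace_single, String.toList_ofList]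
      rw [show ("T" : String).toList = ['T'] from rfl,
          show ("a" : String).toList = ['a'] from rfl,
          replace_single, String.toList_ofList]
      rw [show ("C" : String).toList = ['C'] from rfl,
          show ("g" : String).toList = ['g'] from rfl,
          replace_single, String.toList_ofList]
      rw [show ("G" : String).toList = ['G'] from rfl,
          show ("c" : String).toList = ['c'] from rfl,
          replace_single]
      simp only [String.toList_ofList, List.map_map]
      rfl
    · push Not at hv
      have hany : DNA.toList.any (fun x => ¬ (x ∈ (['A', 'C', 'G', 'T'] : List Char))) = true := by
        obtain ⟨c, hc, hcn⟩ := hv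
        exact List.any_eq_true.mpr ⟨c, hc, by simpa using hcn⟩
      rw [if_pos (by exact_mod_cast hany)]
      rw [pvBLoop_invalid DNA.toList.reverse []
        (by obtain ⟨c, hc, hcn⟩ := hv; exact ⟨c, List.mem_reverse.mpr hc, hcn⟩)]
      rfl
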